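-- pv_equiv track=rewrite | github.com/chemy-cm/Bioinformatics-scripts | snp_matrix.py | generate_snp_matrix
-- ===== SOURCE A (Python) =====
-- def calculate_snp_count(sample1, sample2):
--     count = 0
--     for s1, s2 in zip(sample1, sample2):
--         if s1 != '.' and s2 != '.' and s1 != s2:
--             count += 1
--     return count
--
-- def generate_snp_matrix(samples, snps):
--     matrix = [[0 for _ in range(len(samples))] for _ in range(len(samples))]
--     for i in range(len(samples)):
--         for j in range(i+1, len(samples)):
--             count = calculate_snp_count(snps[i], snps[j])
--             matrix[i][j] = count
--             matrix[j][i] = count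
--     return matrix
-- ===== SOURCE B (Python) =====
-- def generate_snp_matrix(samples, snps):
--     n = len(samples)
--     matrix = [[0] * n for _ in range(n)]
--     max_len = max((len(s) for s in snps[:n]), default=0)
--     for p in range(max_len):
--         col = [s[p] if p < len(s) else '.' for s in snps[:n]]
--         for i in range(n):
--             ci = col[i]
--             if ci == '.':
--                 continue
--             row = matrix[i]
--             for j in range(i + 1, n):
--                 cj = col[j]
--                 if cj != '.' and ci != cj:
--                     row[j] += 1
--                     matrix[j][i] += 1
--     return matrix
-- ===== Notes on version B (the rewrite author's own statement) =====
-- stated objective: alternative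
-- what changed: Loop nesting inverted to position-major order: B allocates the zero matrix, then for each alignment position precomputes the column of alleles ('.' for out-of-range) and adds 1 to both mirrored cells of every pair whose alleles are defined and differ, instead of A's per-pair Hamming helper filling the upper triangle and mirroring it.
import Mathlib
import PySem

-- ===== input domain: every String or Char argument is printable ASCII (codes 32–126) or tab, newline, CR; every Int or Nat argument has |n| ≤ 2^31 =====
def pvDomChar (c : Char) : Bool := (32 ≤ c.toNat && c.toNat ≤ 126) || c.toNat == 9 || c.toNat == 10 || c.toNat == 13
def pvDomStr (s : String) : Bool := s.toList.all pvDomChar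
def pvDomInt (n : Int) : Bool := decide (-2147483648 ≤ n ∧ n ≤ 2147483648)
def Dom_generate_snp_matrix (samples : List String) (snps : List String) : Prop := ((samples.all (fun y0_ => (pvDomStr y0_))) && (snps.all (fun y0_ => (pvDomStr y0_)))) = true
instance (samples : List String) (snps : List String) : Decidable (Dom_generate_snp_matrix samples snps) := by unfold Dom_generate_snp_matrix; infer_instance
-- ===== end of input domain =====

-- B re-implements the SNP matrix in position-major order: per position it precomputes the
-- allele column and accumulates differing pairs incrementally, instead of A's per-pair
-- Hamming helper over the upper triangle; same asymptotic cost.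


-- shared helper: the n×n zero matrix both Pythons build up front
def pvZeros (n : Nat) : List (List Int) :=
  (List.range n).map (fun _ => (List.range n).map (fun _ => (0 : Int)))

-- ===== PORT A =====
def pvCalcCount (s1 s2 : String) : Int :=
  List.foldl
    (fun count p => if p.1 ≠ '.' ∧ p.2 ≠ '.' ∧ p.1 ≠ p.2 then count + 1 else count)
    0 (List.zip s1.toList s2.toList)

def generate_snp_matrix (samples : List String) (snps : List String) : List (List Int) :=
  List.foldl
    (fun m i =>
      List.foldl
        (fun m j =>
          let count := pvCalcCount (snps.getD i "") (snps.getD j "")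
          let m := m.modify i (fun row => row.set j count)
          m.modify j (fun row => row.set i count))
        m (List.range' (i + 1) (samples.length - (i + 1))))
    (pvZeros samples.length) (List.range samples.length)

-- ===== PORT B =====
-- max((len(s) for s in snps[:n]), default=0)
def pvMaxLen (snps : List String) (n : Nat) : Nat :=
  PySem.List.maxD
    ((PySem.List.slice snps none (some (n : Int))).map (fun s => s.toList.length))
    (fun x => x) 0

def generate_snp_matrix_alt (samples : List String) (snps : List String) : List (List Int) :=
  List.foldl
    (fun m p =>
      let col := (PySem.List.slice snps none (some (samples.length : Int))).map
        (fun s => if p < s.toList.length then s.toList.getD p ' ' else '.')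
      List.foldl
        (fun m i =>
          let ci := col.getD i '.'
          if ci = '.' then m
          else
            List.foldl
              (fun m j =>
                let cj := col.getD j '.'
                if cj ≠ '.' ∧ ci ≠ cj then
                  (m.modify i (fun row => row.modify j (· + 1))).modify j
                    (fun row => row.modify i (· + 1))
                else m)
              m (List.range' (i + 1) (samples.length - (i + 1))))
        m (List.range samples.length))
    (pvZeros samples.length) (List.range (pvMaxLen snps samples.length))

-- ===== PRECONDITION & SPEC =====
-- Pre_ excludes exactly the inputs on which Python A raises IndexError
-- (at least two samples but fewer SNP strings than samples).
def Pre_generate_snp_matrix (samples : List String) (snps : List String) : Prop :=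
  samples.length ≤ snps.length ∨ samples.length ≤ 1
instance (samples : List String) (snps : List String) : Decidable (Pre_generate_snp_matrix samples snps) := by unfold Pre_generate_snp_matrix; infer_instance

def pvWitness_generate_snp_matrix : List String × List String :=
  (["s1", "s2", "s3"], ["AC.G", "AG.", "TG.G"])

def Spec_generate_snp_matrix (samples : List String) (snps : List String) (out : List (List Int)) : Prop := out = generate_snp_matrix_alt samples snps
instance (samples : List String) (snps : List String) (out : List (List Int)) : Decidable (Spec_generate_snp_matrix samples snps out) := by unfold Spec_generate_snp_matrix; infer_instance

-- ===== CLAIM (what is proved, stated in full; the proofs are below) =====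
def Claim_equal_generate_snp_matrix : Prop := ∀ (samples : List String) (snps : List String), Dom_generate_snp_matrix samples snps → Pre_generate_snp_matrix samples snps → Spec_generate_snp_matrix samples snps (generate_snp_matrix samples snps)

-- ===== LEMMAS AND PROOFS =====

-- the combined per-position, per-pair test (guards replicate zip truncation)
def pvHit (snps : List String) (p i j : Nat) : Bool :=
  let a := (snps.getD i "").toList
  let b := (snps.getD j "").toList
  decide (p < a.length ∧ p < b.length ∧
          a.getD p ' ' ≠ '.' ∧ b.getD p ' ' ≠ '.' ∧ a.getD p ' ' ≠ b.getD p ' ')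

-- entry access and shape
def pvE (m : List (List Int)) (a b : Nat) : Int := (m.getD a []).getD b 0
def pvShape (m : List (List Int)) (n : Nat) : Prop := m.length = n ∧ ∀ r ∈ m, r.length = n

def pvCnt (snps : List String) (i j : Nat) : Int :=
  pvCalcCount (snps.getD i "") (snps.getD j "")

def pvQ (p : Char × Char) : Bool := decide (p.1 ≠ '.' ∧ p.2 ≠ '.' ∧ p.1 ≠ p.2)

def pvPairs (n : Nat) : List (Nat × Nat) :=
  (List.range n).flatMap (fun i => (List.range' (i + 1) (n - (i + 1))).map (fun j => (i, j)))

def pvStepA (snps : List String) (m : List (List Int)) (q : Nat × Nat) : List (List Int) :=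
  (m.modify q.1 (fun row => row.set q.2 (pvCnt snps q.1 q.2))).modify q.2
    (fun row => row.set q.1 (pvCnt snps q.1 q.2))

def pvStepB (snps : List String) (p : Nat) (m : List (List Int)) (q : Nat × Nat) : List (List Int) :=
  if pvHit snps p q.1 q.2 then
    (m.modify q.1 (fun row => row.modify q.2 (· + 1))).modify q.2 (fun row => row.modify q.1 (· + 1))
  else m

lemma pv_foldl_foldl {α β γ : Type} (xs : List α) (g : α → List β) (f : γ → β → γ)
    (init : γ) :
    xs.foldl (fun m i => (g i).foldl f m) init = (xs.flatMap g).foldl f init := by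
  induction xs generalizing init with
  | nil => rfl
  | cons x xs ih => simp [List.flatMap_cons, List.foldl_append, ih]

lemma pvA_flat (samples snps : List String) :
    generate_snp_matrix samples snps =
      (pvPairs samples.length).foldl (pvStepA snps) (pvZeros samples.length) := by
  simp only [generate_snp_matrix, pvPairs, ← pv_foldl_foldl, List.foldl_map, pvStepA, pvCnt]

-- the character Source B's column holds for sample i at position p ('.' when out of range)
def pvCC (snps : List String) (p i : Nat) : Char :=
  if p < (snps.getD i "").toList.length then (snps.getD i "").toList.getD p ' ' else '.'

lemma pv_col_getD (snps : List String) (n p i : Nat) (hi : i < n) :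
    ((PySem.List.slice snps none (some (n : Int))).map
        (fun s => if p < s.toList.length then s.toList.getD p ' ' else '.')).getD i '.' =
      pvCC snps p i := by
  rw [PySem.List.slice_to_natCast]
  rcases Nat.lt_or_ge i snps.length with h | h
  · rw [List.getD_eq_getElem _ _ (by simp; omega), List.getElem_map]
    unfold pvCC
    rw [List.getD_eq_getElem _ _ h]
    have ht : (snps.take n)[i]'(by simp; omega) = snps[i] := List.getElem_take
    rw [ht]
  · rw [List.getD_eq_default _ _ (by simp; omega)]
    unfold pvCC
    rw [List.getD_eq_default _ _ h]
    simp

lemma pvHit_eq_cc (snps : List String) (p i j : Nat) :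
    pvHit snps p i j =
      decide (¬ pvCC snps p i = '.' ∧ ¬ pvCC snps p j = '.' ∧
        ¬ pvCC snps p i = pvCC snps p j) := by
  simp only [pvHit, pvCC]
  apply decide_eq_decide.mpr
  by_cases h1 : p < (snps.getD i "").toList.length <;>
    by_cases h2 : p < (snps.getD j "").toList.length
  · rw [if_pos h1, if_pos h2]
    constructor
    · rintro ⟨-, -, h3, h4, h5⟩
      exact ⟨h3, h4, h5⟩
    · rintro ⟨h3, h4, h5⟩
      exact ⟨h1, h2, h3, h4, h5⟩
  · rw [if_pos h1, if_neg h2]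
    constructor
    · rintro ⟨-, hh, -⟩
      exact absurd hh h2
    · rintro ⟨-, hne, -⟩
      exact absurd rfl hne
  · rw [if_neg h1]
    constructor
    · rintro ⟨hh, -⟩
      exact absurd hh h1
    · rintro ⟨hne, -⟩
      exact absurd rfl hne
  · rw [if_neg h1]
    constructor
    · rintro ⟨hh, -⟩
      exact absurd hh h1
    · rintro ⟨hne, -⟩
      exact absurd rfl hne

lemma pvB_flat (samples snps : List String) :
    generate_snp_matrix_alt samples snps =
      (List.range (pvMaxLen snps samples.length)).foldl
        (fun m p => (pvPairs samples.length).foldl (pvStepB snps p) m)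
        (pvZeros samples.length) := by
  simp only [generate_snp_matrix_alt, pvPairs, ← pv_foldl_foldl, List.foldl_map]
  apply PySem.List.foldl_congr_mem
  intro m p _
  apply PySem.List.foldl_congr_mem
  intro m' i hi
  have hin : i < samples.length := List.mem_range.mp hi
  rw [pv_col_getD snps _ p i hin]
  by_cases hci : pvCC snps p i = '.'
  · rw [if_pos hci]
    symm
    calc (List.range' (i + 1) (samples.length - (i + 1))).foldl
            (fun m j => pvStepB snps p m (i, j)) m'
        = (List.range' (i + 1) (samples.length - (i + 1))).foldl
            (fun acc _ => acc) m' := by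
          apply PySem.List.foldl_congr_mem
          intro acc x _
          simp [pvStepB, pvHit_eq_cc, hci]
      _ = m' := PySem.List.foldl_ignore _ _
  · rw [if_neg hci]
    apply PySem.List.foldl_congr_mem
    intro m'' j hj
    have hjn : j < samples.length := by
      have := List.mem_range'_1.mp hj
      omega
    rw [pv_col_getD snps _ p j hjn]
    simp only [pvStepB, pvHit_eq_cc, decide_eq_true_eq]
    by_cases hcj : ¬ pvCC snps p j = '.' ∧ ¬ pvCC snps p i = pvCC snps p j
    · rw [if_pos hcj, if_pos ⟨hci, hcj.1, hcj.2⟩]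
    · rw [if_neg hcj, if_neg (by rintro ⟨-, h2, h3⟩; exact hcj ⟨h2, h3⟩)]

lemma pvShape_zeros (n : Nat) : pvShape (pvZeros n) n := by
  constructor
  · simp [pvZeros]
  · intro r hr
    simp only [pvZeros, List.mem_map] at hr
    obtain ⟨_, _, rfl⟩ := hr
    simp

lemma pvE_zeros (n a b : Nat) : pvE (pvZeros n) a b = 0 := by
  have hz : pvZeros n = List.replicate n (List.replicate n (0 : Int)) := by
    simp [pvZeros]
  simp only [pvE, hz, List.getD, List.getElem?_replicate]
  split_ifs <;> simp

lemma pvShape_modify {m : List (List Int)} {n : Nat} (i : Nat) (f : List Int → List Int)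
    (hm : pvShape m n) (hf : ∀ r, r.length = n → (f r).length = n) :
    pvShape (m.modify i f) n := by
  constructor
  · rw [List.length_modify]; exact hm.1
  · intro r hr
    rcases List.mem_iff_getElem.mp hr with ⟨k, hk, rfl⟩
    rw [List.getElem_modify]
    split
    · exact hf _ (hm.2 _ (List.getElem_mem _))
    · exact hm.2 _ (List.getElem_mem _)

lemma pvShape_stepA (snps : List String) {m : List (List Int)} {n : Nat} (q : Nat × Nat)
    (hm : pvShape m n) : pvShape (pvStepA snps m q) n := by
  unfold pvStepA
  refine pvShape_modify _ _ (pvShape_modify _ _ hm ?_) ?_ <;>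
    intro r hr <;> rw [List.length_set] <;> exact hr

lemma pvShape_stepB (snps : List String) (p : Nat) {m : List (List Int)} {n : Nat}
    (q : Nat × Nat) (hm : pvShape m n) : pvShape (pvStepB snps p m q) n := by
  unfold pvStepB
  split
  · refine pvShape_modify _ _ (pvShape_modify _ _ hm ?_) ?_ <;>
      intro r hr <;> rw [List.length_modify] <;> exact hr
  · exact hm

lemma pvShape_foldA (snps : List String) (ps : List (Nat × Nat)) {m : List (List Int)}
    {n : Nat} (hm : pvShape m n) : pvShape (ps.foldl (pvStepA snps) m) n := by
  induction ps generalizing m with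
  | nil => exact hm
  | cons q ps ih => exact ih (pvShape_stepA snps q hm)

lemma pvShape_foldB (snps : List String) (p : Nat) (ps : List (Nat × Nat))
    {m : List (List Int)} {n : Nat} (hm : pvShape m n) :
    pvShape (ps.foldl (pvStepB snps p) m) n := by
  induction ps generalizing m with
  | nil => exact hm
  | cons q ps ih => exact ih (pvShape_stepB snps p q hm)

lemma pvShape_foldB_range (snps : List String) (qs : List Nat) {m : List (List Int)}
    {n : Nat} (hm : pvShape m n) :
    pvShape (qs.foldl (fun m p => (pvPairs n).foldl (pvStepB snps p) m) m) n := by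
  induction qs generalizing m with
  | nil => exact hm
  | cons p qs ih => exact ih (pvShape_foldB snps p _ hm)

lemma pv_row_len {m : List (List Int)} {n a : Nat} (hm : pvShape m n) (ha : a < n) :
    (m.getD a []).length = n := by
  rw [List.getD_eq_getElem _ _ (hm.1 ▸ ha)]
  exact hm.2 _ (List.getElem_mem _)

lemma pv_getD_modify (m : List (List Int)) (i : Nat) (f : List Int → List Int) (a : Nat)
    (ha : a < m.length) :
    (m.modify i f).getD a [] = if i = a then f (m.getD a []) else m.getD a [] := by
  rw [List.getD_eq_getElem _ _ (by rw [List.length_modify]; exact ha),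
      List.getElem_modify, List.getD_eq_getElem _ _ ha]

lemma pv_getD_set (row : List Int) (j : Nat) (v : Int) (b : Nat) (hb : b < row.length) :
    (row.set j v).getD b 0 = if j = b then v else row.getD b 0 := by
  rw [List.getD_eq_getElem _ _ (by rw [List.length_set]; exact hb),
      List.getElem_set, List.getD_eq_getElem _ _ hb]

lemma pv_getD_modify_row (row : List Int) (j : Nat) (f : Int → Int) (b : Nat)
    (hb : b < row.length) :
    (row.modify j f).getD b 0 = if j = b then f (row.getD b 0) else row.getD b 0 := by
  rw [List.getD_eq_getElem _ _ (by rw [List.length_modify]; exact hb),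
      List.getElem_modify, List.getD_eq_getElem _ _ hb]

lemma pvQ_swap (x y : Char) : pvQ (x, y) = pvQ (y, x) := by
  simp only [pvQ]
  apply decide_eq_decide.mpr
  constructor <;> rintro ⟨h1, h2, h3⟩ <;> exact ⟨h2, h1, Ne.symm h3⟩

lemma pvCalc_eq_countP (s t : String) :
    pvCalcCount s t = ((List.zip s.toList t.toList).countP pvQ : Int) := by
  unfold pvCalcCount
  rw [PySem.List.foldl_ite_add_one
    (fun p : Char × Char => p.1 ≠ '.' ∧ p.2 ≠ '.' ∧ p.1 ≠ p.2), zero_add]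
  congr 1

lemma pv_zipQ_comm : ∀ xs ys : List Char,
    (List.zip xs ys).countP pvQ = (List.zip ys xs).countP pvQ := by
  intro xs
  induction xs with
  | nil => intro ys; cases ys <;> simp
  | cons x xs ih =>
    intro ys
    cases ys with
    | nil => simp
    | cons y ys =>
      simp only [List.zip_cons_cons, List.countP_cons]
      rw [ih ys, pvQ_swap x y]

lemma pvCnt_comm (snps : List String) (i j : Nat) : pvCnt snps i j = pvCnt snps j i := by
  unfold pvCnt
  rw [pvCalc_eq_countP, pvCalc_eq_countP, pv_zipQ_comm]

lemma pvCnt_self (snps : List String) (i : Nat) : pvCnt snps i i = 0 := by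
  unfold pvCnt
  rw [pvCalc_eq_countP]
  have : ∀ xs : List Char, (List.zip xs xs).countP pvQ = 0 := by
    intro xs
    induction xs with
    | nil => simp
    | cons x xs ih => simp [ih, pvQ]
  simp [this]

lemma pvHit_comm (snps : List String) (p i j : Nat) :
    pvHit snps p i j = pvHit snps p j i := by
  simp only [pvHit]
  apply decide_eq_decide.mpr
  constructor <;> rintro ⟨h1, h2, h3, h4, h5⟩ <;> exact ⟨h2, h1, h4, h3, Ne.symm h5⟩

lemma pvHit_self (snps : List String) (p i : Nat) : pvHit snps p i i = false := by
  simp [pvHit]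

lemma pvE_stepA (snps : List String) {m : List (List Int)} {n : Nat} (q : Nat × Nat)
    (a b : Nat) (hm : pvShape m n) (hq : q.1 ≠ q.2) (ha : a < n) (hb : b < n) :
    pvE (pvStepA snps m q) a b =
      if q = (a, b) ∨ q = (b, a) then pvCnt snps a b else pvE m a b := by
  obtain ⟨i, j⟩ := q
  simp only at hq
  have hal : a < m.length := hm.1 ▸ ha
  have hrowb : b < (m.getD a []).length := by rw [pv_row_len hm ha]; exact hb
  unfold pvStepA pvE
  simp only
  rw [pv_getD_modify _ _ _ a (by rw [List.length_modify]; exact hal),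
      pv_getD_modify _ _ _ a hal]
  by_cases hja : j = a <;> by_cases hia : i = a
  · omega
  · rw [if_pos hja, if_neg hia, pv_getD_set _ _ _ _ hrowb]
    by_cases hib : i = b
    · rw [if_pos hib, if_pos (Or.inr (by rw [hib, hja])), hib, hja, pvCnt_comm]
    · rw [if_neg hib, if_neg ?_]
      rintro (h | h)
      · exact hia (congrArg Prod.fst h)
      · exact hib (congrArg Prod.fst h)
  · rw [if_neg hja, if_pos hia, pv_getD_set _ _ _ _ hrowb]
    by_cases hjb : j = b
    · rw [if_pos hjb, if_pos (Or.inl (by rw [hia, hjb])), hia, hjb]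
    · rw [if_neg hjb, if_neg ?_]
      rintro (h | h)
      · exact hjb (congrArg Prod.snd h)
      · exact hja (congrArg Prod.snd h)
  · rw [if_neg hja, if_neg hia, if_neg ?_]
    rintro (h | h)
    · exact hia (congrArg Prod.fst h)
    · exact hja (congrArg Prod.snd h)

lemma pvE_stepB (snps : List String) (p : Nat) {m : List (List Int)} {n : Nat}
    (q : Nat × Nat) (a b : Nat) (hm : pvShape m n) (hq : q.1 ≠ q.2) (ha : a < n)
    (hb : b < n) :
    pvE (pvStepB snps p m q) a b =
      pvE m a b +
        (if pvHit snps p a b ∧ (q = (a, b) ∨ q = (b, a)) then 1 else 0) := by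
  obtain ⟨i, j⟩ := q
  simp only at hq
  have hal : a < m.length := hm.1 ▸ ha
  have hrowb : b < (m.getD a []).length := by rw [pv_row_len hm ha]; exact hb
  unfold pvStepB
  simp only
  by_cases hhit : pvHit snps p i j
  · rw [if_pos hhit]
    unfold pvE
    rw [pv_getD_modify _ _ _ a (by rw [List.length_modify]; exact hal),
        pv_getD_modify _ _ _ a hal]
    by_cases hja : j = a <;> by_cases hia : i = a
    · omega
    · rw [if_pos hja, if_neg hia, pv_getD_modify_row _ _ _ _ hrowb]
      by_cases hib : i = b
      · have hba : pvHit snps p a b = true := by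
          rw [← hja, ← hib, pvHit_comm]; exact hhit
        rw [if_pos hib, if_pos ⟨hba, Or.inr (by rw [hib, hja])⟩]
      · rw [if_neg hib, if_neg ?_, add_zero]
        rintro ⟨-, (h | h)⟩
        · exact hia (congrArg Prod.fst h)
        · exact hib (congrArg Prod.fst h)
    · rw [if_neg hja, if_pos hia, pv_getD_modify_row _ _ _ _ hrowb]
      by_cases hjb : j = b
      · have hba : pvHit snps p a b = true := by rw [← hia, ← hjb]; exact hhit
        rw [if_pos hjb, if_pos ⟨hba, Or.inl (by rw [hia, hjb])⟩]
      · rw [if_neg hjb, if_neg ?_, add_zero]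
        rintro ⟨-, (h | h)⟩
        · exact hjb (congrArg Prod.snd h)
        · exact hja (congrArg Prod.snd h)
    · rw [if_neg hja, if_neg hia, if_neg ?_, add_zero]
      rintro ⟨-, (h | h)⟩
      · exact hia (congrArg Prod.fst h)
      · exact hja (congrArg Prod.snd h)
  · rw [if_neg hhit, if_neg ?_, add_zero]
    rintro ⟨hh, (h | h)⟩
    · injection h with h1 h2
      exact hhit (by rw [h1, h2]; exact hh)
    · injection h with h1 h2
      exact hhit (by rw [h1, h2, pvHit_comm]; exact hh)

lemma pvE_foldA (snps : List String) (ps : List (Nat × Nat)) {m : List (List Int)}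
    {n : Nat} (a b : Nat) (hm : pvShape m n) (hps : ∀ q ∈ ps, q.1 ≠ q.2) (ha : a < n)
    (hb : b < n) :
    pvE (ps.foldl (pvStepA snps) m) a b =
      if (a, b) ∈ ps ∨ (b, a) ∈ ps then pvCnt snps a b else pvE m a b := by
  induction ps generalizing m with
  | nil => simp
  | cons q ps ih =>
    rw [List.foldl_cons,
        ih (pvShape_stepA snps q hm) (fun q hq => hps q (List.mem_cons_of_mem _ hq)),
        pvE_stepA snps q a b hm (hps q List.mem_cons_self) ha hb]
    simp only [List.mem_cons]
    split_ifs with h1 h2 h3 h4 h5 <;> first | rfl | tauto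

lemma pvE_foldB (snps : List String) (p : Nat) (ps : List (Nat × Nat))
    {m : List (List Int)} {n : Nat} (a b : Nat) (hm : pvShape m n)
    (hps : ∀ q ∈ ps, q.1 ≠ q.2) (ha : a < n) (hb : b < n) :
    pvE (ps.foldl (pvStepB snps p) m) a b =
      pvE m a b +
        (if pvHit snps p a b then ((ps.count (a, b) : Int) + ps.count (b, a)) else 0) := by
  induction ps generalizing m with
  | nil => simp
  | cons q ps ih =>
    have hq := hps q List.mem_cons_self
    rw [List.foldl_cons,
        ih (pvShape_stepB snps p q hm) (fun r hr => hps r (List.mem_cons_of_mem _ hr)),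
        pvE_stepB snps p q a b hm hq ha hb,
        List.count_cons, List.count_cons]
    by_cases hh : pvHit snps p a b
    · simp only [hh, true_and, if_true, beq_iff_eq, Prod.ext_iff]
      split_ifs <;> push_cast <;> omega
    · simp only [hh, false_and, if_false, Bool.false_eq_true]
      ring

lemma pv_mem_pvPairs {n a b : Nat} : (a, b) ∈ pvPairs n ↔ a < b ∧ b < n := by
  simp only [pvPairs, List.mem_flatMap, List.mem_map, List.mem_range, List.mem_range'_1,
    Prod.mk.injEq]
  constructor
  · rintro ⟨i, hi, j, hj, rfl, rfl⟩
    omega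
  · rintro ⟨h1, h2⟩
    exact ⟨a, by omega, b, ⟨by omega, by omega⟩, rfl, rfl⟩

lemma pvPairs_ne (n : Nat) : ∀ q ∈ pvPairs n, q.1 ≠ q.2 := by
  rintro ⟨i, j⟩ h
  have := pv_mem_pvPairs.mp h
  simp only
  omega

lemma pv_sum_single (n a : Nat) (f : Nat → Nat) :
    (((List.range n).map (fun i => if i = a then f i else 0)).sum) =
      if a < n then f a else 0 := by
  induction n with
  | zero => simp
  | succ n ih =>
    rw [List.range_succ, List.map_append, List.sum_append, ih]
    by_cases h : n = a
    · subst h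
      simp
    · simp only [List.map_cons, List.map_nil, if_neg h, List.sum_cons, List.sum_nil]
      by_cases h2 : a < n
      · rw [if_pos h2, if_pos (by omega)]
        omega
      · rw [if_neg h2, if_neg (by omega)]
        omega

lemma pv_count_pvPairs (n a b : Nat) :
    (pvPairs n).count (a, b) = if a < b ∧ b < n then 1 else 0 := by
  unfold pvPairs
  rw [List.count_flatMap]
  have hmap : ∀ i : Nat,
      ((List.range' (i + 1) (n - (i + 1))).map (fun j => (i, j))).count (a, b) =
        if i = a then (List.range' (a + 1) (n - (a + 1))).count b else 0 := by
    intro i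
    by_cases hia : i = a
    · rw [if_pos hia, ← hia]
      exact List.count_map_of_injective _ _ (fun x y h => congrArg Prod.snd h) _
    · rw [if_neg hia, List.count_eq_zero]
      intro hmem
      rcases List.mem_map.mp hmem with ⟨j, -, hj⟩
      exact hia (congrArg Prod.fst hj)
  calc ((List.range n).map fun i =>
          ((List.range' (i + 1) (n - (i + 1))).map (fun j => (i, j))).count (a, b)).sum
      = ((List.range n).map fun i =>
          if i = a then (List.range' (a + 1) (n - (a + 1))).count b else 0).sum := by
        congr 1
        exact List.map_congr_left (fun i _ => hmap i)
    _ = if a < n then (List.range' (a + 1) (n - (a + 1))).count b else 0 :=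
        pv_sum_single n a _
    _ = if a < b ∧ b < n then 1 else 0 := by
        by_cases hb : a < b ∧ b < n
        · rw [if_pos hb, if_pos (by omega)]
          exact List.count_eq_one_of_mem (List.nodup_range' )
            (List.mem_range'_1.mpr ⟨by omega, by omega⟩)
        · rw [if_neg hb]
          by_cases han : a < n
          · rw [if_pos han, List.count_eq_zero_of_not_mem]
            intro hmem
            have := List.mem_range'_1.mp hmem
            omega
          · rw [if_neg han]

lemma pvE_foldB_range (snps : List String) (qs : List Nat) {m : List (List Int)}
    {n : Nat} (a b : Nat) (hm : pvShape m n) (ha : a < n) (hb : b < n) :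
    pvE (qs.foldl (fun m p => (pvPairs n).foldl (pvStepB snps p) m) m) a b =
      pvE m a b + (qs.countP (fun p => pvHit snps p a b) : Int) := by
  induction qs generalizing m with
  | nil => simp
  | cons p qs ih =>
    rw [List.foldl_cons, ih (pvShape_foldB snps p _ hm),
        pvE_foldB snps p _ a b hm (pvPairs_ne n) ha hb,
        List.countP_cons, pv_count_pvPairs, pv_count_pvPairs]
    by_cases hab : a = b
    · subst hab
      simp [pvHit_self]
    · by_cases hh : pvHit snps p a b
      · simp only [hh, if_true]
        rcases Nat.lt_or_ge a b with h | h
        · rw [if_pos ⟨h, hb⟩, if_neg (by omega)]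
          push_cast
          ring
        · rw [if_neg (by omega), if_pos ⟨by omega, ha⟩]
          push_cast
          ring
      · simp only [hh, if_false, Bool.false_eq_true]
        push_cast
        ring

lemma pv_cnt_eq_countP : ∀ (xs ys : List Char) (L : Nat), xs.length ≤ L →
    ys.length ≤ L →
    (List.range L).countP
        (fun p => decide (p < xs.length ∧ p < ys.length ∧
          xs.getD p ' ' ≠ '.' ∧ ys.getD p ' ' ≠ '.' ∧ xs.getD p ' ' ≠ ys.getD p ' ')) =
      (List.zip xs ys).countP pvQ := by
  intro xs
  induction xs with
  | nil =>
    intro ys L _ _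
    simp
  | cons x xs ih =>
    intro ys L hx hy
    cases ys with
    | nil => simp
    | cons y ys =>
      cases L with
      | zero => simp at hx
      | succ L =>
        rw [List.range_succ_eq_map, List.countP_cons, List.countP_map]
        have hcongr :
            (List.range L).countP
                ((fun p => decide (p < (x :: xs).length ∧ p < (y :: ys).length ∧
                  (x :: xs).getD p ' ' ≠ '.' ∧ (y :: ys).getD p ' ' ≠ '.' ∧
                  (x :: xs).getD p ' ' ≠ (y :: ys).getD p ' ')) ∘ Nat.succ) =
              (List.range L).countP
                (fun p => decide (p < xs.length ∧ p < ys.length ∧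
                  xs.getD p ' ' ≠ '.' ∧ ys.getD p ' ' ≠ '.' ∧
                  xs.getD p ' ' ≠ ys.getD p ' ')) := by
          apply List.countP_congr
          intro p _
          simp only [Function.comp_apply, List.length_cons, List.getD_cons_succ,
            decide_eq_true_eq]
          constructor
          · rintro ⟨h1, h2, h3, h4, h5⟩
            exact ⟨by omega, by omega, h3, h4, h5⟩
          · rintro ⟨h1, h2, h3, h4, h5⟩
            exact ⟨by omega, by omega, h3, h4, h5⟩
        rw [hcongr, ih ys L (by simpa using hx) (by simpa using hy)]
        simp only [List.zip_cons_cons, List.countP_cons, List.length_cons,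
          List.getD_cons_zero]
        congr 1
        have hiff : ((0 : Nat) < xs.length + 1 ∧ (0 : Nat) < ys.length + 1 ∧
            x ≠ '.' ∧ y ≠ '.' ∧ x ≠ y) ↔ (x ≠ '.' ∧ y ≠ '.' ∧ x ≠ y) := by
          constructor
          · rintro ⟨-, -, h3, h4, h5⟩
            exact ⟨h3, h4, h5⟩
          · rintro ⟨h3, h4, h5⟩
            exact ⟨by omega, by omega, h3, h4, h5⟩
        rw [decide_eq_decide.mpr hiff]
        rfl

lemma pv_len_le_maxLen (snps : List String) (n a : Nat) (ha : a < n) :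
    (snps.getD a "").toList.length ≤ pvMaxLen snps n := by
  unfold pvMaxLen
  rw [PySem.List.slice_to_natCast]
  rcases Nat.lt_or_ge a snps.length with h | h
  · have hmem : (snps.getD a "").toList.length ∈
        ((snps.take n).map (fun s => s.toList.length)) := by
      apply List.mem_map.mpr
      refine ⟨snps.getD a "", ?_, rfl⟩
      rw [List.getD_eq_getElem _ _ h]
      have : (snps.take n)[a]'(by simp; omega) = snps[a] := List.getElem_take
      rw [← this]
      exact List.getElem_mem _
    unfold PySem.List.maxD
    cases hmax : PySem.List.max? ((snps.take n).map (fun s => s.toList.length)) (fun x => x) with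
    | none =>
      rw [PySem.List.max?_eq_none_iff] at hmax
      rw [hmax] at hmem
      simp at hmem
    | some mx =>
      have := PySem.List.max?_isMax hmax _ hmem
      simpa [hmax] using this
  · rw [List.getD_eq_default _ _ h]
    simp

lemma pv_eq_of_E {m1 m2 : List (List Int)} {n : Nat} (h1 : pvShape m1 n)
    (h2 : pvShape m2 n) (h : ∀ a b, a < n → b < n → pvE m1 a b = pvE m2 a b) :
    m1 = m2 := by
  apply List.ext_getElem (by rw [h1.1, h2.1])
  intro a ha1 ha2
  have han : a < n := h1.1 ▸ ha1
  have hr1 : m1[a].length = n := h1.2 _ (List.getElem_mem _)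
  have hr2 : m2[a].length = n := h2.2 _ (List.getElem_mem _)
  apply List.ext_getElem (by rw [hr1, hr2])
  intro b hb1 hb2
  have hbn : b < n := hr1 ▸ hb1
  have := h a b han hbn
  unfold pvE at this
  rw [List.getD_eq_getElem _ _ ha1, List.getD_eq_getElem _ _ ha2,
      List.getD_eq_getElem _ _ hb1, List.getD_eq_getElem _ _ hb2] at this
  exact this

-- ===== VERDICT (by name: the statement is the Claim_ definition above) =====
theorem generate_snp_matrix_spec : Claim_equal_generate_snp_matrix := by
  intro samples snps _hdom _hpre
  unfold Spec_generate_snp_matrix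
  rw [pvA_flat, pvB_flat]
  apply pv_eq_of_E (pvShape_foldA snps _ (pvShape_zeros _))
    (pvShape_foldB_range snps _ (pvShape_zeros _))
  intro a b ha hb
  rw [pvE_foldA snps _ a b (pvShape_zeros _) (pvPairs_ne _) ha hb,
      pvE_foldB_range snps _ a b (pvShape_zeros _) ha hb,
      pvE_zeros, zero_add]
  have hRHS : ((List.range (pvMaxLen snps samples.length)).countP
      (fun p => pvHit snps p a b) : Int) = pvCnt snps a b := by
    have := pv_cnt_eq_countP (snps.getD a "").toList (snps.getD b "").toList
      (pvMaxLen snps samples.length) (pv_len_le_maxLen snps _ a ha)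
      (pv_len_le_maxLen snps _ b hb)
    simp only [pvHit]
    rw [this, pvCnt, pvCalc_eq_countP]
  rw [hRHS]
  by_cases hab : a = b
  · subst hab
    rw [if_neg (by simp [pv_mem_pvPairs]), pvCnt_self]
  · rcases Nat.lt_or_ge a b with h | h
    · rw [if_pos (Or.inl (pv_mem_pvPairs.mpr ⟨h, hb⟩))]
    · rw [if_pos (Or.inr (pv_mem_pvPairs.mpr ⟨by omega, ha⟩))]
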